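-- pv_equiv track=rewrite | github.com/kirankm/Launch_School_Python | PY101/02_Small_Programs/RPS/rps.py | get_user_perf
-- ===== SOURCE A (Python) =====
-- def get_user_perf(history):
--     user_performance = {}
--     for match in history:
--         player = match['player_name']
--         winner = match['last_match']
--         user_performance.setdefault(player, [])
--         user_performance[player].append(winner)
--     return user_performance
-- ===== SOURCE B (Python) =====
-- def get_user_perf(history):
--     players = list(dict.fromkeys(m['player_name'] for m in history))
--     return {p: [m['last_match'] for m in history if m['player_name'] == p]
--             for p in players}
-- ===== Notes on version B (the rewrite author's own statement) =====
-- stated objective: alternative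
-- what changed: B replaces A's incremental setdefault/append dict loop by a two-phase pass: dedup the player names in first-occurrence order, then build each player's winner list with a filtered comprehension over the history.
import Mathlib
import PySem

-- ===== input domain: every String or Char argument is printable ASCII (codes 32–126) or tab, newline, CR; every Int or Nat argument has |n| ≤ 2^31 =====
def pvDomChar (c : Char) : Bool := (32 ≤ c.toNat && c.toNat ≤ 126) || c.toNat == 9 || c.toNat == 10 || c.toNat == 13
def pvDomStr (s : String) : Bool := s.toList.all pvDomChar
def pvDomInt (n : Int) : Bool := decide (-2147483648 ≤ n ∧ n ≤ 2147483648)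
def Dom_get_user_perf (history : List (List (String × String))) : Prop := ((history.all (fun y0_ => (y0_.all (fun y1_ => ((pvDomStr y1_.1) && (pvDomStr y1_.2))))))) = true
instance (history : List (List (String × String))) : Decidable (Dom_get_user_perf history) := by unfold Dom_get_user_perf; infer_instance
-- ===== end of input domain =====

-- B groups winners by a first-occurrence dedup of player names plus one filtered scan per player,
-- instead of A's single incremental setdefault/append dict loop (objective: alternative decomposition).

-- m['k'] on the match dict (exact where the key is present; Pre_ excludes the KeyError case)
def pvItem (m : List (String × String)) (k : String) : String :=
  (((PySem.Dict.ofList m).get? k).getD "")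

-- ===== PORT A =====
def get_user_perf (history : List (List (String × String))) : List (String × List String) :=
  (history.foldl
    (fun (d : PySem.Dict String (List String)) m =>
      let player := pvItem m "player_name"
      let winner := pvItem m "last_match"
      (d.setdefault player []).modify player [] (fun l => l ++ [winner]))
    PySem.Dict.empty).items

-- ===== PORT B =====
def get_user_perf_alt (history : List (List (String × String))) : List (String × List String) :=
  let players := PySem.List.dedup (history.map (fun m => pvItem m "player_name"))
  players.map (fun p =>
    (p, (history.filter (fun m => pvItem m "player_name" == p)).map
          (fun m => pvItem m "last_match")))

-- ===== PRECONDITION & SPEC =====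
-- excludes exactly the matches missing one of the two keys, on which Python A raises KeyError
def Pre_get_user_perf (history : List (List (String × String))) : Prop :=
  ∀ m ∈ history, "player_name" ∈ m.map Prod.fst ∧ "last_match" ∈ m.map Prod.fst
instance (history : List (List (String × String))) : Decidable (Pre_get_user_perf history) := by unfold Pre_get_user_perf; infer_instance
def pvWitness_get_user_perf : (List (List (String × String))) :=
  [[("player_name", "ana"), ("last_match", "win")],
   [("player_name", "bob"), ("last_match", "loss")],
   [("player_name", "ana"), ("last_match", "tie")]]

def Spec_get_user_perf (history : List (List (String × String))) (out : List (String × List String)) : Prop := out = get_user_perf_alt history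
instance (history : List (List (String × String))) (out : List (String × List String)) : Decidable (Spec_get_user_perf history out) := by unfold Spec_get_user_perf; infer_instance

-- ===== CLAIM (what is proved, stated in full; the proofs are below) =====
def Claim_equal_get_user_perf : Prop := ∀ (history : List (List (String × String))), Dom_get_user_perf history → Pre_get_user_perf history → Spec_get_user_perf history (get_user_perf history)

-- ===== LEMMAS AND PROOFS =====

-- A's setdefault-then-append step is a single Dict.modify
theorem pv_setdefault_modify (d : PySem.Dict String (List String)) (k : String)
    (f : List String → List String) :
    (d.setdefault k []).modify k [] f = d.modify k [] f := by
  by_cases h : d.contains k = true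
  · rw [PySem.Dict.setdefault_of_contains d [] h]
  · simp only [Bool.not_eq_true] at h
    rw [PySem.Dict.setdefault_of_not_contains d [] h]
    simp only [PySem.Dict.modify]
    rw [PySem.Dict.getD_insert_self, PySem.Dict.insert_insert_self,
      PySem.Dict.getD_of_not_contains d ([] : List String) h]

-- ===== VERDICT (by name: the statement is the Claim_ definition above) =====
theorem get_user_perf_spec : Claim_equal_get_user_perf := by
  intro history _ _
  unfold Spec_get_user_perf get_user_perf get_user_perf_alt
  -- replace A's step by a plain modify
  have hstep : (fun (d : PySem.Dict String (List String)) m =>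
      let player := pvItem m "player_name"
      let winner := pvItem m "last_match"
      (d.setdefault player []).modify player [] (fun l => l ++ [winner]))
      = (fun (d : PySem.Dict String (List String)) m =>
          d.modify (pvItem m "player_name") []
            ((fun (_ : PySem.Dict String (List String)) m (l : List String) =>
              l ++ [pvItem m "last_match"]) d m)) := by
    funext d m
    exact pv_setdefault_modify d (pvItem m "player_name") _
  rw [hstep]
  set D := history.foldl
      (fun (d : PySem.Dict String (List String)) m =>
        d.modify (pvItem m "player_name") []
          ((fun (_ : PySem.Dict String (List String)) m (l : List String) =>
            l ++ [pvItem m "last_match"]) d m)) PySem.Dict.empty with hD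
  have hkeys : D.keys = PySem.List.dedup (history.map (fun m => pvItem m "player_name")) := by
    rw [hD, PySem.Dict.keys_foldl_modify_key history (fun m => pvItem m "player_name") [] _ PySem.Dict.empty]
    simp [PySem.Dict.keys_empty, PySem.Set.update_nil_left, PySem.List.dedup_eq_ofList]
  have hnodup : D.keys.Nodup := by
    rw [hD]
    exact PySem.Dict.nodup_keys_foldl_modify_key history (fun m => pvItem m "player_name") [] _
      PySem.Dict.empty (by simp [PySem.Dict.keys_empty])
  have hgetD : ∀ c : String, D.getD c [] =
      (history.filter (fun m => pvItem m "player_name" == c)).map (fun m => pvItem m "last_match") := by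
    intro c
    have hmap : D = (history.map (fun m => (pvItem m "player_name", pvItem m "last_match"))).foldl
        (fun (d : PySem.Dict String (List String)) p => d.modify p.1 [] (fun x => x ++ [p.2]))
        PySem.Dict.empty := by
      rw [hD, List.foldl_map]
    rw [hmap, PySem.Dict.getD_foldl_modify_append, PySem.Dict.getD_empty, List.nil_append,
      List.filter_map, List.map_map]
    rfl
  rw [PySem.Dict.items_eq_map_keys D hnodup [], hkeys]
  exact List.map_congr_left (fun k _ => by rw [hgetD k])
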